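-- pv_equiv track=rewrite | github.com/amr-khalil/leetcode | Backtracking/Combinatorial/LetterCombinationsOfAPhoneNumber.py | all_cobmi
-- ===== SOURCE A (Python) =====
-- def all_cobmi(arr):
--     res = []
--     def backtrack(solution, start):
--         if start == len(arr):
--             res.append(solution[:])
--             return
--
--         choices = arr[start]
--         for choice in choices:
--             backtrack(solution + choice, start+1)
--
--     backtrack("", 0)
--     return res
-- ===== SOURCE B (Python) =====
-- def all_cobmi(arr):
--     res = [""]
--     for s in arr:
--         res = [prefix + c for prefix in res for c in s]
--     return res
-- ===== Notes on version B (the rewrite author's own statement) =====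
-- stated objective: simpler
-- what changed: Replaces the recursive backtracking with a shared mutable result list by an iterative left-to-right product: the result starts as a single empty prefix and each position multiplies it by its character choices.
import Mathlib
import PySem

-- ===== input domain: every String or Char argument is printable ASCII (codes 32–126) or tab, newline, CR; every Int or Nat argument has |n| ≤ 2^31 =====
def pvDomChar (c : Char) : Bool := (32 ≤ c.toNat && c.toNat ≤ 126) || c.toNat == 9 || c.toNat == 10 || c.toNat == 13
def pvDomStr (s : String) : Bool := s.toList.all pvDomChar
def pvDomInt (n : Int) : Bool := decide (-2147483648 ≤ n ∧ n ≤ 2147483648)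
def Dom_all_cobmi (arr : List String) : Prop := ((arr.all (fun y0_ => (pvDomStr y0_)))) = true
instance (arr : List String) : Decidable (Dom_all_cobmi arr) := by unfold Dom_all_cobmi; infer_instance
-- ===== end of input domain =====

-- B replaces A's recursive backtracking (mutable res list) by an iterative product fold; objective: simpler.

-- ===== PORT A =====
-- A's backtrack(solution, start): the index `start` into arr is represented by the
-- suffix arr.drop start; `start == len(arr)` is the suffix being []; res is threaded.
def backtrackA (res : List String) (solution : String) : List String → List String
  | [] => res ++ [solution]
  | choices :: rest =>
      choices.toList.foldl (fun r choice => backtrackA r (solution.push choice) rest) res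

def all_cobmi (arr : List String) : List String :=
  backtrackA [] "" arr

-- ===== PORT B =====
def all_cobmi_alt (arr : List String) : List String :=
  arr.foldl (fun res s => res.flatMap (fun pfx => s.toList.map (fun c => pfx.push c))) [""]

-- ===== PRECONDITION & SPEC =====
def Spec_all_cobmi (arr : List String) (out : List String) : Prop := out = all_cobmi_alt arr
instance (arr : List String) (out : List String) : Decidable (Spec_all_cobmi arr out) := by unfold Spec_all_cobmi; infer_instance

-- ===== CLAIM (what is proved, stated in full; the proofs are below) =====
def Claim_equal_all_cobmi : Prop := ∀ (arr : List String), Dom_all_cobmi arr → Spec_all_cobmi arr (all_cobmi arr)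

-- ===== LEMMAS AND PROOFS =====
-- the combinations of the suffix `l` pfxed by `sol`
def prodFrom (l : List String) (sol : String) : List String :=
  match l with
  | [] => [sol]
  | s :: t => s.toList.flatMap (fun c => prodFrom t (sol.push c))

theorem backtrackA_eq (l : List String) : ∀ (res : List String) (sol : String),
    backtrackA res sol l = res ++ prodFrom l sol := by
  induction l with
  | nil => intro res sol; simp [backtrackA, prodFrom]
  | cons s t ih =>
    intro res sol
    simp only [backtrackA, prodFrom]
    generalize s.toList = cs
    induction cs generalizing res with
    | nil => simp
    | cons c cs ih2 =>
      simp only [List.foldl_cons, List.flatMap_cons]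
      rw [ih, ih2, List.append_assoc]

theorem foldl_eq (l : List String) : ∀ (prefs : List String),
    l.foldl (fun res s => res.flatMap (fun pfx => s.toList.map (fun c => pfx.push c))) prefs
      = prefs.flatMap (fun p => prodFrom l p) := by
  induction l with
  | nil => intro prefs; simp [prodFrom]
  | cons s t ih =>
    intro prefs
    simp only [List.foldl_cons, prodFrom]
    rw [ih]
    simp [List.flatMap_assoc, List.flatMap_map]

-- ===== VERDICT (by name: the statement is the Claim_ definition above) =====
theorem all_cobmi_spec : Claim_equal_all_cobmi := by
  intro arr _
  unfold Spec_all_cobmi all_cobmi all_cobmi_alt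
  rw [backtrackA_eq, foldl_eq]
  simp
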